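-- pv_equiv track=rewrite | github.com/Deserve82/KK_Algorithm_Study | Kangho/pro_word_puzzle.py | solution
-- ===== SOURCE A (Python) =====
-- def solution(strs, t):
--     lt = len(t)
--     cache = [20000] * (lt+1)
--     cache[0] = 0
--     for i in range(lt):
--         for str in strs:
--             if str[0] == t[i]:
--                 val = i+len(str)
--                 if t[i:val] == str:
--                     cache[val] = min(cache[i] + 1, cache[val])
--     answer = cache[lt]
--     if answer >= 20000:
--         answer = -1
--     return answer
-- ===== SOURCE B (Python) =====
-- def solution(strs, t):
--     # BFS shortest path over positions 0..len(t): edge i -> i+len(w) when t[i:] starts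
--     # with w; answer = distance from 0 to len(t), -1 if unreachable (or >= 20000).
--     n = len(t)
--     words = [w for w in strs if w]
--     seen = {0}
--     frontier = [0]
--     dist = 0
--     while frontier and dist < 20000:
--         if n in frontier:
--             return dist
--         nxt = []
--         for i in frontier:
--             for w in words:
--                 j = i + len(w)
--                 if j not in seen and t[i:j] == w:
--                     seen.add(j)
--                     nxt.append(j)
--         frontier = nxt
--         dist += 1
--     return -1
-- ===== Notes on version B (the rewrite author's own statement) =====
-- stated objective: alternative
-- what changed: A fills a sentinel-initialized DP array by pushing min-relaxations forward from every position of t; B instead runs a breadth-first search over positions 0..len(t) with a frontier queue and a visited set, expanding each reachable position exactly once and returning the BFS layer index at which len(t) is first reached.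
import Mathlib
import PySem

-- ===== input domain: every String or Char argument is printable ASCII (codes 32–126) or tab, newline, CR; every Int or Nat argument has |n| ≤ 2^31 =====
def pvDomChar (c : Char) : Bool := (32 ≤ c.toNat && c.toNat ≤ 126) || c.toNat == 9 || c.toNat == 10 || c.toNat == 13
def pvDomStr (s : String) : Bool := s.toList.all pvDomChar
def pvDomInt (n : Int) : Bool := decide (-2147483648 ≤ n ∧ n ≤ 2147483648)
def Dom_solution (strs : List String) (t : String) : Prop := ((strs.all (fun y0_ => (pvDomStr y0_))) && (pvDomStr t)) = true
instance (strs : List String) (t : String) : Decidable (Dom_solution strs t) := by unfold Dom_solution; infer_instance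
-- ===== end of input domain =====

-- B replaces A's forward push-relaxation DP over a 20000-prefilled array by a breadth-first
-- search over positions with a frontier queue and a visited set (alternative algorithm, same worst-case cost).
-- Pre_ excludes only the inputs where Python A raises IndexError ("" in strs with nonempty t).


set_option maxHeartbeats 1000000

-- ===== PORT A =====
def solution (strs : List String) (t : String) : Int :=
  let lt : Int := PySem.Str.len t
  let cache : List Int := PySem.List.pySetD (PySem.List.pyRepeat [(20000 : Int)] (lt + 1)) 0 0
  let cache := (PySem.List.pyRange 0 lt 1).foldl (fun cache i =>
    strs.foldl (fun cache str =>
      match PySem.Str.pyGet? str 0, PySem.Str.pyGet? t i with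
      | some c0, some ci =>
        if c0 = ci then
          let val : Int := i + PySem.Str.len str
          if PySem.Str.slice t (some i) (some val) = str then
            PySem.List.pySetD cache val
              (min (PySem.List.pyGetD cache i 0 + 1) (PySem.List.pyGetD cache val 0))
          else cache
        else cache
      | _, _ => cache) cache) cache
  let answer := PySem.List.pyGetD cache lt 0
  if answer ≥ 20000 then -1 else answer

-- ===== PORT B =====
-- BFS loop: frontier = positions reached at distance `dist`, seen = all discovered positions.
def solutionAltLoop (words : List String) (t : String) (n : Int)
    (seen : PySem.Set Int) (frontier : List Int) (dist : Int) : Int :=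
  if h : frontier ≠ [] ∧ dist < 20000 then
    if n ∈ frontier then dist
    else
      let p := frontier.foldl (fun (p : PySem.Set Int × List Int) i =>
        words.foldl (fun (p : PySem.Set Int × List Int) w =>
          let j := i + PySem.Str.len w
          if PySem.Set.contains p.1 j = false ∧ PySem.Str.slice t (some i) (some j) = w then
            (PySem.Set.add p.1 j, p.2 ++ [j])
          else p) p) (seen, ([] : List Int))
      solutionAltLoop words t n p.1 p.2 (dist + 1)
  else -1
termination_by (20000 - dist).toNat
decreasing_by
  have := h.2; omega

def solution_alt (strs : List String) (t : String) : Int :=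
  let n : Int := PySem.Str.len t
  let words := strs.filter (fun w => w ≠ "")
  solutionAltLoop words t n (PySem.Set.ofList [0]) [0] 0

-- ===== PRECONDITION & SPEC =====
-- Pre_ excludes exactly the inputs where Python A raises IndexError: an empty string in strs
-- together with a nonempty t (A evaluates str[0] for every word at every position of t).
def Pre_solution (strs : List String) (t : String) : Prop := "" ∈ strs → t = ""
instance (strs : List String) (t : String) : Decidable (Pre_solution strs t) := by unfold Pre_solution; infer_instance
def pvWitness_solution : List String × String := (["ab", "b"], "ab")

def Spec_solution (strs : List String) (t : String) (out : Int) : Prop := out = solution_alt strs t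
instance (strs : List String) (t : String) (out : Int) : Decidable (Spec_solution strs t out) := by unfold Spec_solution; infer_instance

-- ===== CLAIM (what is proved, stated in full; the proofs are below) =====
def Claim_equal_solution : Prop := ∀ (strs : List String) (t : String), Dom_solution strs t → Pre_solution strs t → Spec_solution strs t (solution strs t)

-- ===== LEMMAS AND PROOFS =====

-- getD/set/replicate helpers
theorem pvGetD_set_self (l : List Int) (j : Nat) (v : Int) (hj : j < l.length) :
    (l.set j v).getD j 0 = v := by
  simp [List.getD_eq_getElem?_getD, hj]

theorem pvGetD_set_ne (l : List Int) (j k : Nat) (v : Int) (hne : j ≠ k) :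
    (l.set j v).getD k 0 = l.getD k 0 := by
  simp [List.getD_eq_getElem?_getD, hne]

theorem pvGetD_replicate (n j : Nat) (v : Int) :
    (List.replicate n v).getD j 0 = if j < n then v else 0 := by
  split <;> rename_i h <;> simp [List.getD_eq_getElem?_getD, h]

-- conditional-min fold
def pvMF {α : Type} (f : α → Int) (P : α → Prop) [DecidablePred P] (b : Int) (l : List α) : Int :=
  l.foldl (fun b x => if P x then min b (f x) else b) b

theorem pvMF_cons {α : Type} (f : α → Int) (P : α → Prop) [DecidablePred P] (b : Int) (x : α) (l : List α) :
    pvMF f P b (x :: l) = pvMF f P (if P x then min b (f x) else b) l := rfl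

theorem pvMF_le_init {α : Type} (f : α → Int) (P : α → Prop) [DecidablePred P] (l : List α) :
    ∀ b, pvMF f P b l ≤ b := by
  induction l with
  | nil => intro b; simp [pvMF]
  | cons x xs ih =>
    intro b
    rw [pvMF_cons]
    refine le_trans (ih _) ?_
    split <;> omega

theorem pvMF_le_mem {α : Type} (f : α → Int) (P : α → Prop) [DecidablePred P] (l : List α) :
    ∀ b x, x ∈ l → P x → pvMF f P b l ≤ f x := by
  induction l with
  | nil => intro b x hx; simp at hx
  | cons y ys ih =>
    intro b x hx hP
    rw [pvMF_cons]
    rcases List.mem_cons.mp hx with h | h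
    · subst h
      refine le_trans (pvMF_le_init _ _ _ _) ?_
      rw [if_pos hP]; omega
    · exact ih _ x h hP

theorem pvMF_cases {α : Type} (f : α → Int) (P : α → Prop) [DecidablePred P] (l : List α) :
    ∀ b, pvMF f P b l = b ∨ ∃ x ∈ l, P x ∧ pvMF f P b l = f x := by
  induction l with
  | nil => intro b; left; rfl
  | cons y ys ih =>
    intro b
    rw [pvMF_cons]
    by_cases hP : P y
    · rw [if_pos hP]
      rcases ih (min b (f y)) with h | ⟨x, hx, hPx, h⟩
      · rcases min_cases b (f y) with ⟨h2, _⟩ | ⟨h2, _⟩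
        · left; rw [h, h2]
        · right; exact ⟨y, List.mem_cons_self, hP, by rw [h, h2]⟩
      · right; exact ⟨x, List.mem_cons_of_mem _ hx, hPx, h⟩
    · rw [if_neg hP]
      rcases ih b with h | ⟨x, hx, hPx, h⟩
      · left; exact h
      · right; exact ⟨x, List.mem_cons_of_mem _ hx, hPx, h⟩

theorem pvMF_le_pvMF {α β : Type} (f : α → Int) (P : α → Prop) [DecidablePred P]
    (g : β → Int) (Q : β → Prop) [DecidablePred Q] (b : Int) (l₁ : List α) (l₂ : List β)
    (h : ∀ y ∈ l₂, Q y → ∃ x ∈ l₁, P x ∧ f x ≤ g y) :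
    pvMF f P b l₁ ≤ pvMF g Q b l₂ := by
  rcases pvMF_cases g Q l₂ b with h0 | ⟨y, hy, hQ, h0⟩
  · rw [h0]; exact pvMF_le_init _ _ _ _
  · obtain ⟨x, hx, hP, hle⟩ := h y hy hQ
    rw [h0]
    exact le_trans (pvMF_le_mem f P l₁ b x hx hP) hle

theorem pvMF_congr_mem {α : Type} (f f' : α → Int) (P : α → Prop) [DecidablePred P] (l : List α)
    (h : ∀ x ∈ l, P x → f x = f' x) : ∀ b, pvMF f P b l = pvMF f' P b l := by
  induction l with
  | nil => intro b; rfl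
  | cons y ys ih =>
    intro b
    rw [pvMF_cons, pvMF_cons]
    have hrec := ih (fun x hx => h x (List.mem_cons_of_mem _ hx))
    by_cases hP : P y
    · rw [if_pos hP, if_pos hP, h y List.mem_cons_self hP, hrec]
    · rw [if_neg hP, if_neg hP, hrec]

theorem pvMF_congr {α : Type} (f f' : α → Int) (P P' : α → Prop) [DecidablePred P] [DecidablePred P']
    (l : List α) (hP : ∀ x, P x ↔ P' x) (hf : ∀ x, P x → f x = f' x) :
    ∀ b, pvMF f P b l = pvMF f' P' b l := by
  induction l with
  | nil => intro b; rfl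
  | cons y ys ih =>
    intro b
    rw [pvMF_cons, pvMF_cons]
    by_cases h : P y
    · rw [if_pos h, if_pos ((hP y).mp h), hf y h, ih]
    · rw [if_neg h, if_neg (fun hc => h ((hP y).mpr hc)), ih]

theorem pvMF_filter {α : Type} (f : α → Int) (P : α → Prop) [DecidablePred P] (q : α → Bool)
    (h : ∀ x, P x → q x = true) (l : List α) : ∀ b, pvMF f P b (l.filter q) = pvMF f P b l := by
  induction l with
  | nil => intro b; rfl
  | cons y ys ih =>
    intro b
    by_cases hq : q y = true
    · rw [List.filter_cons_of_pos hq, pvMF_cons, pvMF_cons, ih]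
    · rw [List.filter_cons_of_neg (by simpa using hq), pvMF_cons,
        if_neg (fun hc => hq (h y hc)), ih]

theorem pvMF_append_singleton {α : Type} (f : α → Int) (P : α → Prop) [DecidablePred P]
    (b : Int) (l : List α) (x : α) :
    pvMF f P b (l ++ [x]) = if P x then min (pvMF f P b l) (f x) else pvMF f P b l := by
  simp [pvMF, List.foldl_append]

-- ===== prefix DP value (the common spec of both programs) =====
def pvNp (strs : List String) (l : List Char) : Int :=
  if h0 : l.length = 0 then 0
  else strs.foldl (fun b w =>
    if h : w.toList ≠ [] ∧ l.drop (l.length - w.toList.length) = w.toList then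
      min b (pvNp strs (l.take (l.length - w.toList.length)) + 1)
    else b) 20000
termination_by l.length
decreasing_by
  have h3 : 0 < w.toList.length := List.length_pos_iff.mpr h.1
  simp only [List.length_take]
  omega

theorem pvNp_nil (strs : List String) : pvNp strs [] = 0 := by rw [pvNp]; rfl

theorem pvNp_eq (strs : List String) (l : List Char) (h : l.length ≠ 0) :
    pvNp strs l = pvMF (fun w => pvNp strs (l.take (l.length - w.toList.length)) + 1)
      (fun w => w.toList ≠ [] ∧ l.drop (l.length - w.toList.length) = w.toList) 20000 strs := by
  rw [pvNp, dif_neg h]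
  simp only [pvMF, dite_eq_ite]

theorem pvNp_nonneg_aux (strs : List String) :
    ∀ (m : Nat) (l : List Char), l.length ≤ m → 0 ≤ pvNp strs l := by
  intro m
  induction m with
  | zero =>
    intro l hl
    have : l = [] := List.eq_nil_of_length_eq_zero (by omega)
    subst this; rw [pvNp_nil]
  | succ m ih =>
    intro l hl
    by_cases h0 : l.length = 0
    · have : l = [] := List.eq_nil_of_length_eq_zero h0
      subst this; rw [pvNp_nil]
    · rw [pvNp_eq strs l h0]
      rcases pvMF_cases (fun w => pvNp strs (l.take (l.length - w.toList.length)) + 1)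
        (fun w => w.toList ≠ [] ∧ l.drop (l.length - w.toList.length) = w.toList) strs 20000 with h | ⟨w, _, ⟨hne, _⟩, heq⟩
      · omega
      · have hwpos : 0 < w.toList.length := List.length_pos_iff.mpr hne
        have := ih (l.take (l.length - w.toList.length)) (by simp only [List.length_take]; omega)
        omega

theorem pvNp_nonneg (strs : List String) (l : List Char) : 0 ≤ pvNp strs l :=
  pvNp_nonneg_aux strs l.length l le_rfl

theorem pvNp_pos (strs : List String) (l : List Char) (h : l.length ≠ 0) : 1 ≤ pvNp strs l := by
  rw [pvNp_eq strs l h]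
  rcases pvMF_cases (fun w => pvNp strs (l.take (l.length - w.toList.length)) + 1)
    (fun w => w.toList ≠ [] ∧ l.drop (l.length - w.toList.length) = w.toList) strs 20000 with h | ⟨w, _, _, heq⟩
  · omega
  · have := pvNp_nonneg strs (l.take (l.length - w.toList.length))
    omega

-- pvNp in "prefix of tl" form
theorem pvNp_take_eq (ws : List String) (tl : List Char) (j : Nat) (hjN : j ≤ tl.length) (hj0 : j ≠ 0) :
    pvNp ws (tl.take j) = pvMF (fun w => pvNp ws (tl.take (j - w.toList.length)) + 1)
      (fun w => w.toList ≠ [] ∧ w.toList.length ≤ j ∧ (tl.drop (j - w.toList.length)).take w.toList.length = w.toList)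
      20000 ws := by
  have hjlen : (tl.take j).length = j := by rw [List.length_take]; omega
  rw [pvNp_eq ws (tl.take j) (by omega)]
  apply pvMF_congr
  · intro w
    rw [hjlen]
    constructor
    · rintro ⟨hne, hdrop⟩
      have hwle : w.toList.length ≤ j := by
        by_contra hgt
        have h5 : j - w.toList.length = 0 := by omega
        rw [h5, List.drop_zero] at hdrop
        have := congrArg List.length hdrop
        rw [hjlen] at this
        omega
      refine ⟨hne, hwle, ?_⟩
      rw [List.drop_take, show j - (j - w.toList.length) = w.toList.length by omega] at hdrop
      exact hdrop
    · rintro ⟨hne, hwle, htake⟩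
      refine ⟨hne, ?_⟩
      rw [List.drop_take, show j - (j - w.toList.length) = w.toList.length by omega]
      exact htake
  · intro w _
    rw [hjlen, List.take_take, Nat.min_eq_left (by omega)]

-- a match edge raises the prefix distance by at most one
theorem pvD_edge (ws : List String) (tl : List Char) (i : Nat) (w : String)
    (hw : w ∈ ws) (hne : w.toList ≠ [])
    (hm : (tl.drop i).take w.toList.length = w.toList) :
    i + w.toList.length ≤ tl.length ∧
      pvNp ws (tl.take (i + w.toList.length)) ≤ pvNp ws (tl.take i) + 1 := by
  have hwpos : 0 < w.toList.length := List.length_pos_iff.mpr hne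
  have hlen := congrArg List.length hm
  rw [List.length_take, List.length_drop] at hlen
  have hjN : i + w.toList.length ≤ tl.length := by omega
  refine ⟨hjN, ?_⟩
  rw [pvNp_take_eq ws tl (i + w.toList.length) hjN (by omega)]
  have hcond : w.toList ≠ [] ∧ w.toList.length ≤ i + w.toList.length ∧
      (tl.drop (i + w.toList.length - w.toList.length)).take w.toList.length = w.toList := by
    refine ⟨hne, by omega, ?_⟩
    rw [show i + w.toList.length - w.toList.length = i by omega]
    exact hm
  have h1 := pvMF_le_mem
    (fun w' => pvNp ws (tl.take (i + w.toList.length - w'.toList.length)) + 1)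
    (fun w' => w'.toList ≠ [] ∧ w'.toList.length ≤ i + w.toList.length ∧
      (tl.drop (i + w.toList.length - w'.toList.length)).take w'.toList.length = w'.toList)
    ws 20000 w hw hcond
  simpa [show i + w.toList.length - w.toList.length = i from by omega] using h1

-- every position at finite positive distance has a predecessor one layer earlier
theorem pvD_pred (ws : List String) (tl : List Char) (j : Nat)
    (hjN : j ≤ tl.length) (hj0 : j ≠ 0) (hlt : pvNp ws (tl.take j) < 20000) :
    ∃ i w, w ∈ ws ∧ w.toList ≠ [] ∧ i + w.toList.length = j ∧
      (tl.drop i).take w.toList.length = w.toList ∧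
      pvNp ws (tl.take i) = pvNp ws (tl.take j) - 1 := by
  rw [pvNp_take_eq ws tl j hjN hj0] at hlt ⊢
  rcases pvMF_cases (fun w => pvNp ws (tl.take (j - w.toList.length)) + 1)
    (fun w => w.toList ≠ [] ∧ w.toList.length ≤ j ∧ (tl.drop (j - w.toList.length)).take w.toList.length = w.toList)
    ws 20000 with h | ⟨w, hw, ⟨hne, hwle, htake⟩, heq⟩
  · omega
  · exact ⟨j - w.toList.length, w, hw, hne, by omega, htake, by omega⟩

-- BFS layers are gap-free below the distance of any finitely-reachable position
theorem pvD_gap (ws : List String) (tl : List Char) :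
    ∀ j, j ≤ tl.length → pvNp ws (tl.take j) < 20000 →
      ∀ e : Int, 0 ≤ e → e ≤ pvNp ws (tl.take j) →
        ∃ i, i ≤ tl.length ∧ pvNp ws (tl.take i) = e := by
  intro j
  induction j using Nat.strong_induction_on with
  | _ j IH =>
    intro hjN hlt e he hle
    by_cases heq : pvNp ws (tl.take j) = e
    · exact ⟨j, hjN, heq⟩
    · have hj0 : j ≠ 0 := by
        intro hc; subst hc
        simp only [List.take_zero, pvNp_nil] at hle heq
        omega
      obtain ⟨i, w, _, hne, hij, _, hd⟩ := pvD_pred ws tl j hjN hj0 hlt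
      have hwpos : 0 < w.toList.length := List.length_pos_iff.mpr hne
      exact IH i (by omega) (by omega) (by omega) e he (by omega)

-- dropping the empty words does not change the DP value
theorem pvNp_filter_aux (strs : List String) :
    ∀ (m : Nat) (l : List Char), l.length ≤ m →
      pvNp (strs.filter (fun w => w ≠ "")) l = pvNp strs l := by
  intro m
  induction m with
  | zero =>
    intro l hl
    have : l = [] := List.eq_nil_of_length_eq_zero (by omega)
    subst this; rw [pvNp_nil, pvNp_nil]
  | succ m ih =>
    intro l hl
    by_cases h0 : l.length = 0
    · have : l = [] := List.eq_nil_of_length_eq_zero h0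
      subst this; rw [pvNp_nil, pvNp_nil]
    · rw [pvNp_eq _ l h0, pvNp_eq strs l h0]
      rw [pvMF_filter _ _ _ (fun w hw => by
        simp only [decide_eq_true_eq]
        intro hc; subst hc; exact hw.1 rfl)]
      apply pvMF_congr_mem
      intro w _ hP
      have hwpos : 0 < w.toList.length := List.length_pos_iff.mpr hP.1
      rw [ih (l.take (l.length - w.toList.length)) (by simp only [List.length_take]; omega)]

-- ===== A's loop, abstractly =====
def pvHitB (strs : List String) (tl : List Char) (k j : Nat) : Bool :=
  strs.any (fun w => decide (w.toList ≠ [] ∧ j = k + w.toList.length ∧ (tl.drop k).take w.toList.length = w.toList))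

theorem pvHitB_iff (strs : List String) (tl : List Char) (k j : Nat) :
    pvHitB strs tl k j = true ↔
      ∃ w ∈ strs, w.toList ≠ [] ∧ j = k + w.toList.length ∧ (tl.drop k).take w.toList.length = w.toList := by
  simp [pvHitB]

def pvAcc (strs : List String) (tl : List Char) : Nat → Nat → Int
  | 0, j => if j = 0 then 0 else 20000
  | (k+1), j => if pvHitB strs tl k j then min (pvAcc strs tl k j) (pvAcc strs tl k k + 1) else pvAcc strs tl k j

theorem pvHitB_false_of_le (strs : List String) (tl : List Char) (k j : Nat) (h : j ≤ k) :
    pvHitB strs tl k j = false := by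
  rw [Bool.eq_false_iff]
  intro hb
  obtain ⟨w, _, hne, hj, _⟩ := (pvHitB_iff strs tl k j).mp hb
  have := List.length_pos_iff.mpr hne
  omega

theorem pvAcc_succ (strs : List String) (tl : List Char) (k j : Nat) :
    pvAcc strs tl (k + 1) j =
      if pvHitB strs tl k j then min (pvAcc strs tl k j) (pvAcc strs tl k k + 1) else pvAcc strs tl k j := rfl

theorem pvAcc_unroll (strs : List String) (tl : List Char) (j : Nat) (hj : j ≠ 0) :
    ∀ m, pvAcc strs tl m j =
      pvMF (fun i => pvAcc strs tl i i + 1) (fun i => pvHitB strs tl i j = true) 20000 (List.range m) := by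
  intro m
  induction m with
  | zero => simp [pvAcc, hj, pvMF]
  | succ m ih =>
    rw [List.range_succ, pvMF_append_singleton, pvAcc_succ, ih]

theorem pvAcc_eq_pvNp (strs : List String) (tl : List Char) :
    ∀ k, k ≤ tl.length → ∀ j, j ≤ k → pvAcc strs tl k j = pvNp strs (tl.take j) := by
  intro k
  induction k using Nat.strong_induction_on with
  | _ k IH =>
    intro hk j hj
    rcases k with _ | k'
    · have hj0 : j = 0 := by omega
      subst hj0
      simp [pvAcc, pvNp_nil]
    ·
      by_cases hjk : j ≤ k'
      · rw [pvAcc_succ, pvHitB_false_of_le strs tl k' j hjk]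
        simp only [Bool.false_eq_true, if_false]
        exact IH k' (by omega) (by omega) j hjk
      · have hj' : j = k' + 1 := by omega
        subst hj'
        rw [pvAcc_unroll strs tl (k' + 1) (by omega) (k' + 1)]
        have hcong : ∀ i ∈ List.range (k' + 1), pvHitB strs tl i (k' + 1) = true →
            pvAcc strs tl i i + 1 = pvNp strs (tl.take i) + 1 := by
          intro i hi _
          have hi' : i < k' + 1 := List.mem_range.mp hi
          rw [IH i hi' (by omega) i le_rfl]
        rw [pvMF_congr_mem _ _ _ _ hcong]
        rw [pvNp_take_eq strs tl (k' + 1) (by omega) (by omega)]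
        apply le_antisymm
        · apply pvMF_le_pvMF
          intro w hw hQ
          obtain ⟨hne, hwle, htake⟩ := hQ
          have hwpos : 0 < w.toList.length := List.length_pos_iff.mpr hne
          refine ⟨k' + 1 - w.toList.length, List.mem_range.mpr (by omega), ?_, ?_⟩
          · rw [pvHitB_iff]
            exact ⟨w, hw, hne, by omega, htake⟩
          · apply le_of_eq
            rfl
        · apply pvMF_le_pvMF
          intro i hi hHit
          obtain ⟨w, hw, hne, hij, htake⟩ := (pvHitB_iff strs tl i (k' + 1)).mp hHit
          have hwpos : 0 < w.toList.length := List.length_pos_iff.mpr hne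
          have hile : i < k' + 1 := List.mem_range.mp hi
          refine ⟨w, hw, ⟨hne, by omega, ?_⟩, ?_⟩
          · rw [show k' + 1 - w.toList.length = i by omega]
            exact htake
          · apply le_of_eq
            rw [show k' + 1 - w.toList.length = i by omega]

-- ===== bridging port A to the abstract loop =====
def pvInit (n : Nat) : List Int := (List.replicate (n + 1) (20000 : Int)).set 0 0

def pvAstep (strs : List String) (tl : List Char) (cache : List Int) (k : Nat) : List Int :=
  strs.foldl (fun cache w =>
    if w.toList ≠ [] ∧ (tl.drop k).take w.toList.length = w.toList then
      cache.set (k + w.toList.length)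
        (min (cache.getD k 0 + 1) (cache.getD (k + w.toList.length) 0))
    else cache) cache

theorem pvAstep_cons (w : String) (rest : List String) (tl : List Char) (c : List Int) (k : Nat) :
    pvAstep (w :: rest) tl c k = pvAstep rest tl
      (if w.toList ≠ [] ∧ (tl.drop k).take w.toList.length = w.toList then
        c.set (k + w.toList.length) (min (c.getD k 0 + 1) (c.getD (k + w.toList.length) 0))
      else c) k := rfl

theorem pvAstep_length (tl : List Char) (k : Nat) :
    ∀ (strs : List String) (c : List Int), (pvAstep strs tl c k).length = c.length := by
  intro strs
  induction strs with
  | nil => intro c; rfl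
  | cons w rest ih =>
    intro c
    rw [pvAstep_cons, ih]
    split <;> simp

theorem pvAstep_getD (tl : List Char) :
    ∀ (strs : List String) (c : List Int) (k : Nat), c.length = tl.length + 1 →
      ∀ j, j ≤ tl.length →
        (pvAstep strs tl c k).getD j 0 =
          if pvHitB strs tl k j then min (c.getD j 0) (c.getD k 0 + 1) else c.getD j 0 := by
  intro strs
  induction strs with
  | nil => intro c k _ j _; simp [pvAstep, pvHitB]
  | cons w rest ih =>
    intro c k hlen j hj
    rw [pvAstep_cons]
    have hhit : pvHitB (w :: rest) tl k j =
        (decide (w.toList ≠ [] ∧ j = k + w.toList.length ∧ (tl.drop k).take w.toList.length = w.toList)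
          || pvHitB rest tl k j) := by
      simp [pvHitB]
    by_cases hg : w.toList ≠ [] ∧ (tl.drop k).take w.toList.length = w.toList
    · rw [if_pos hg]
      have hwpos : 0 < w.toList.length := List.length_pos_iff.mpr hg.1
      have hkw : k + w.toList.length ≤ tl.length := by
        have := congrArg List.length hg.2
        rw [List.length_take, List.length_drop] at this
        omega
      set c' := c.set (k + w.toList.length) (min (c.getD k 0 + 1) (c.getD (k + w.toList.length) 0)) with hc'
      have hlen' : c'.length = tl.length + 1 := by rw [hc', List.length_set]; exact hlen
      rw [ih c' k hlen' j hj]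
      have hck : c'.getD k 0 = c.getD k 0 := pvGetD_set_ne _ _ _ _ (by omega)
      by_cases hjw : j = k + w.toList.length
      · have hcj : c'.getD j 0 = min (c.getD k 0 + 1) (c.getD (k + w.toList.length) 0) := by
          rw [hc', hjw]
          exact pvGetD_set_self _ _ _ (by omega)
        rw [hhit]
        have hd : (decide (w.toList ≠ [] ∧ j = k + w.toList.length ∧ (tl.drop k).take w.toList.length = w.toList)) = true := by
          simp only [decide_eq_true_eq]
          exact ⟨hg.1, hjw, hg.2⟩
        rw [hd, Bool.true_or, if_pos rfl]
        rw [hck, hcj, ← hjw]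
        by_cases hb : pvHitB rest tl k j = true
        · rw [if_pos hb]; omega
        · rw [if_neg hb]; omega
      · have hcj : c'.getD j 0 = c.getD j 0 := pvGetD_set_ne _ _ _ _ (by omega)
        rw [hck, hcj, hhit]
        have hd : (decide (w.toList ≠ [] ∧ j = k + w.toList.length ∧ (tl.drop k).take w.toList.length = w.toList)) = false := by
          simp only [decide_eq_false_iff_not]
          intro hc
          exact hjw hc.2.1
        rw [hd, Bool.false_or]
    · rw [if_neg hg]
      rw [ih c k hlen j hj]
      rw [hhit]
      have hd : (decide (w.toList ≠ [] ∧ j = k + w.toList.length ∧ (tl.drop k).take w.toList.length = w.toList)) = false := by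
        simp only [decide_eq_false_iff_not]
        intro hc
        exact hg ⟨hc.1, hc.2.2⟩
      rw [hd, Bool.false_or]

theorem pvA_loop (strs : List String) (tl : List Char) :
    ∀ m, m ≤ tl.length →
      ((List.range m).foldl (pvAstep strs tl) (pvInit tl.length)).length = tl.length + 1 ∧
      ∀ j, j ≤ tl.length →
        ((List.range m).foldl (pvAstep strs tl) (pvInit tl.length)).getD j 0 = pvAcc strs tl m j := by
  intro m
  induction m with
  | zero =>
    intro _
    constructor
    · simp [pvInit]
    · intro j hj
      simp only [List.range_zero, List.foldl_nil]
      show (pvInit tl.length).getD j 0 = if j = 0 then 0 else 20000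
      unfold pvInit
      by_cases hj0 : j = 0
      · subst hj0
        rw [if_pos rfl]
        exact pvGetD_set_self _ _ _ (by simp)
      · rw [if_neg hj0, pvGetD_set_ne _ _ _ _ (by omega), pvGetD_replicate, if_pos (by omega)]
  | succ m ih =>
    intro hm
    obtain ⟨ihlen, ihval⟩ := ih (by omega)
    rw [List.range_succ, List.foldl_append, List.foldl_cons, List.foldl_nil]
    constructor
    · rw [pvAstep_length]; exact ihlen
    · intro j hj
      rw [pvAstep_getD tl strs _ m ihlen j hj, pvAcc_succ]
      rw [ihval j hj, ihval m (by omega)]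

-- string-level bridges
theorem pvNe_empty_iff (w : String) : w ≠ "" ↔ w.toList ≠ [] := by
  constructor
  · intro h; simpa using h
  · intro h hc; rw [hc] at h; simp at h

theorem pvSlice_iff (s w : String) (m : Nat) :
    PySem.Str.slice s (some (m : Int)) (some ((m : Int) + PySem.Str.len w)) = w ↔
      (s.toList.drop m).take w.toList.length = w.toList := by
  rw [PySem.Str.len_eq]
  unfold PySem.Str.slice
  rw [PySem.Chars.slice_eq_listSlice, PySem.List.slice_natCast_add]
  constructor
  · intro h; rw [← h]; simp
  · intro h; rw [h]; apply String.toList_inj.mp; simp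

theorem pvCast_add (m n : Nat) : ((m : Int) + (n : Int)) = ((m + n : Nat) : Int) := by push_cast; ring

theorem pvHead_of_take (tl : List Char) (k : Nat) (hk : k < tl.length) (ch : Char) (r : List Char)
    (h : (tl.drop k).take (ch :: r).length = ch :: r) : tl[k] = ch := by
  cases hx : tl.drop k with
  | nil => rw [hx] at h; simp at h
  | cons y ys =>
    rw [hx] at h
    simp only [List.length_cons, List.take_succ_cons, List.cons.injEq] at h
    have h0 : tl[k] = (tl.drop k)[0]'(by rw [hx]; simp) := by
      rw [List.getElem_drop]
      simp
    rw [h0]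
    simp [hx, h.1]

-- port A's inner loop is pvAstep
theorem pvA_inner_eq (strs : List String) (t : String) (k : Nat) (hk : k < t.toList.length) (c : List Int) :
    strs.foldl (fun cache str =>
      match PySem.Str.pyGet? str 0, PySem.Str.pyGet? t ((k : Nat) : Int) with
      | some c0, some ci =>
        if c0 = ci then
          if PySem.Str.slice t (some ((k : Nat) : Int)) (some (((k : Nat) : Int) + PySem.Str.len str)) = str then
            PySem.List.pySetD cache (((k : Nat) : Int) + PySem.Str.len str)
              (min (PySem.List.pyGetD cache ((k : Nat) : Int) 0 + 1)
                   (PySem.List.pyGetD cache (((k : Nat) : Int) + PySem.Str.len str) 0))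
          else cache
        else cache
      | _, _ => cache) c = pvAstep strs t.toList c k := by
  have hT : PySem.Str.pyGet? t ((k : Nat) : Int) = some (t.toList[k]) := by
    rw [PySem.Str.pyGet?_eq, PySem.Chars.pyGet?_eq_listPyGet?, PySem.List.pyGet?_natCast,
      List.getElem?_eq_getElem hk]
  have hfun : (fun (cache : List Int) (str : String) =>
      match PySem.Str.pyGet? str 0, PySem.Str.pyGet? t ((k : Nat) : Int) with
      | some c0, some ci =>
        if c0 = ci then
          if PySem.Str.slice t (some ((k : Nat) : Int)) (some (((k : Nat) : Int) + PySem.Str.len str)) = str then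
            PySem.List.pySetD cache (((k : Nat) : Int) + PySem.Str.len str)
              (min (PySem.List.pyGetD cache ((k : Nat) : Int) 0 + 1)
                   (PySem.List.pyGetD cache (((k : Nat) : Int) + PySem.Str.len str) 0))
          else cache
        else cache
      | _, _ => cache)
      = (fun (cache : List Int) (w : String) =>
        if w.toList ≠ [] ∧ (t.toList.drop k).take w.toList.length = w.toList then
          cache.set (k + w.toList.length)
            (min (cache.getD k 0 + 1) (cache.getD (k + w.toList.length) 0))
        else cache) := by
    funext cache w
    cases hw : w.toList with
    | nil =>
      have hW : PySem.Str.pyGet? w 0 = none := by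
        rw [PySem.Str.pyGet?_eq, PySem.Chars.pyGet?_eq_listPyGet?, hw]
        rfl
      rw [hW, hT]
      change cache = _
      rw [if_neg (by simp)]
    | cons ch r =>
      have hW : PySem.Str.pyGet? w 0 = some ch := by
        rw [PySem.Str.pyGet?_eq, PySem.Chars.pyGet?_eq_listPyGet?, hw, PySem.List.pyGet?_zero_cons]
      rw [hW, hT]
      show (if ch = t.toList[k] then
          if PySem.Str.slice t (some ((k : Nat) : Int)) (some (((k : Nat) : Int) + PySem.Str.len w)) = w then
            PySem.List.pySetD cache (((k : Nat) : Int) + PySem.Str.len w)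
              (min (PySem.List.pyGetD cache ((k : Nat) : Int) 0 + 1)
                   (PySem.List.pyGetD cache (((k : Nat) : Int) + PySem.Str.len w) 0))
          else cache
        else cache) = _
      by_cases hsl : (t.toList.drop k).take (ch :: r).length = ch :: r
      · have hch : t.toList[k] = ch := pvHead_of_take t.toList k hk ch r hsl
        have hslw : (t.toList.drop k).take w.toList.length = w.toList := by
          rw [hw]; exact hsl
        rw [if_pos hch.symm]
        rw [if_pos ((pvSlice_iff t w k).mpr hslw)]
        rw [if_pos ⟨List.cons_ne_nil _ _, hsl⟩]
        rw [PySem.Str.len_eq, hw, pvCast_add, PySem.List.pySetD_natCast,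
          PySem.List.pyGetD_natCast, PySem.List.pyGetD_natCast]
      · have hslw : ¬ (t.toList.drop k).take w.toList.length = w.toList := by
          rw [hw]; exact hsl
        conv_rhs => rw [if_neg (fun hc => hsl hc.2)]
        by_cases hch : ch = t.toList[k]
        · rw [if_pos hch, if_neg (fun hc => hslw ((pvSlice_iff t w k).mp hc))]
        · rw [if_neg hch]
  rw [hfun]
  rfl

theorem pvFoldl_range_congr {β : Type} (n : Nat) (f g : β → Nat → β)
    (h : ∀ b k, k < n → f b k = g b k) : ∀ b, (List.range n).foldl f b = (List.range n).foldl g b := by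
  induction n with
  | zero => intro b; rfl
  | succ n ih =>
    intro b
    rw [List.range_succ, List.foldl_append, List.foldl_append,
      List.foldl_cons, List.foldl_nil, List.foldl_cons, List.foldl_nil]
    rw [ih (fun b k hk => h b k (by omega)) b, h _ n (by omega)]

theorem pvInitA_eq (n : Nat) :
    PySem.List.pySetD (PySem.List.pyRepeat [(20000 : Int)] ((n : Int) + 1)) 0 0 = pvInit n := by
  unfold pvInit
  rw [PySem.List.pyRepeat_singleton, show ((n : Int) + 1).toNat = n + 1 by omega,
    show ((0 : Int)) = ((0 : Nat) : Int) by norm_num, PySem.List.pySetD_natCast]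

theorem solutionA_eq (strs : List String) (t : String) :
    solution strs t =
      (if pvNp strs t.toList ≥ 20000 then (-1 : Int) else pvNp strs t.toList) := by
  simp only [solution]
  rw [PySem.Str.len_eq, PySem.List.pyRange_zero_natCast, List.foldl_map, pvInitA_eq]
  rw [pvFoldl_range_congr t.toList.length _ (pvAstep strs t.toList)
    (fun c k hk => pvA_inner_eq strs t k hk c)]
  rw [PySem.List.pyGetD_natCast]
  rw [List.getD_eq_getElem?_getD]
  rw [← List.getD_eq_getElem?_getD]
  rw [(pvA_loop strs t.toList t.toList.length le_rfl).2 t.toList.length le_rfl]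
  rw [pvAcc_eq_pvNp strs t.toList t.toList.length le_rfl t.toList.length le_rfl]
  rw [List.take_length]

-- ===== bridging port B (the BFS) to the prefix DP =====

-- one BFS edge-relaxation step, on a (seen, next-frontier) pair
def pvStep (t : String) (p : PySem.Set Int × List Int) (x : Int × String) : PySem.Set Int × List Int :=
  if PySem.Set.contains p.1 (x.1 + PySem.Str.len x.2) = false ∧
      PySem.Str.slice t (some x.1) (some (x.1 + PySem.Str.len x.2)) = x.2 then
    (PySem.Set.add p.1 (x.1 + PySem.Str.len x.2), p.2 ++ [x.1 + PySem.Str.len x.2])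
  else p

def pvE (t : String) (x : Int × String) (z : Int) : Prop :=
  PySem.Str.slice t (some x.1) (some (x.1 + PySem.Str.len x.2)) = x.2 ∧ z = x.1 + PySem.Str.len x.2

theorem pvFoldl_nested_flatMap {α β σ : Type} (f : σ → α × β → σ) (F : List α) (W : List β) :
    ∀ s, F.foldl (fun s i => W.foldl (fun s w => f s (i, w)) s) s
      = (F.flatMap (fun i => W.map (fun w => (i, w)))).foldl f s := by
  induction F with
  | nil => intro s; rfl
  | cons a F ih =>
    intro s
    rw [List.foldl_cons, List.flatMap_cons, List.foldl_append, List.foldl_map]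
    exact ih _

theorem pvStep_fold (t : String) :
    ∀ (L : List (Int × String)) (s acc : List Int), (∀ y ∈ acc, y ∈ s) →
      ((∀ y ∈ (L.foldl (pvStep t) (s, acc)).2, y ∈ (L.foldl (pvStep t) (s, acc)).1) ∧
       (∀ z, z ∈ (L.foldl (pvStep t) (s, acc)).1 ↔ z ∈ s ∨ ∃ x ∈ L, pvE t x z) ∧
       (∀ z, z ∈ (L.foldl (pvStep t) (s, acc)).2 ↔ z ∈ acc ∨ (z ∉ s ∧ ∃ x ∈ L, pvE t x z))) := by
  intro L
  induction L with
  | nil =>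
    intro s acc hsub
    refine ⟨hsub, fun z => by simp, fun z => by simp⟩
  | cons x L ih =>
    intro s acc hsub
    rw [List.foldl_cons]
    by_cases hsl : PySem.Str.slice t (some x.1) (some (x.1 + PySem.Str.len x.2)) = x.2
    · by_cases hct : PySem.Set.contains s (x.1 + PySem.Str.len x.2) = false
      · -- a new vertex is discovered
        have hstep : pvStep t (s, acc) x =
            (PySem.Set.add s (x.1 + PySem.Str.len x.2), acc ++ [x.1 + PySem.Str.len x.2]) := by
          rw [pvStep, if_pos ⟨hct, hsl⟩]
        rw [hstep]
        have hnotmem : x.1 + PySem.Str.len x.2 ∉ s := by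
          intro hc
          rw [(PySem.Set.contains_iff s _).mpr hc] at hct
          simp at hct
        have hsub' : ∀ y ∈ acc ++ [x.1 + PySem.Str.len x.2], y ∈ PySem.Set.add s (x.1 + PySem.Str.len x.2) := by
          intro y hy
          rw [PySem.Set.mem_add]
          rcases List.mem_append.mp hy with h | h
          · exact Or.inl (hsub y h)
          · simp only [List.mem_singleton] at h
            exact Or.inr h
        obtain ⟨c1, c2, c3⟩ := ih (PySem.Set.add s (x.1 + PySem.Str.len x.2)) (acc ++ [x.1 + PySem.Str.len x.2]) hsub'
        refine ⟨c1, ?_, ?_⟩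
        · intro z
          rw [c2 z, PySem.Set.mem_add]
          constructor
          · rintro ((h | h) | h)
            · exact Or.inl h
            · exact Or.inr ⟨x, List.mem_cons_self, hsl, h⟩
            · obtain ⟨x', hx', he⟩ := h
              exact Or.inr ⟨x', List.mem_cons_of_mem _ hx', he⟩
          · rintro (h | ⟨x', hx', he⟩)
            · exact Or.inl (Or.inl h)
            · rcases List.mem_cons.mp hx' with h' | h'
              · subst h'
                exact Or.inl (Or.inr he.2)
              · exact Or.inr ⟨x', h', he⟩
        · intro z
          rw [c3 z, List.mem_append, List.mem_singleton, PySem.Set.mem_add]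
          constructor
          · rintro ((h | h) | ⟨hz, x', hx', he⟩)
            · exact Or.inl h
            · subst h
              exact Or.inr ⟨hnotmem, x, List.mem_cons_self, hsl, rfl⟩
            · refine Or.inr ⟨fun hc => hz (Or.inl hc), x', List.mem_cons_of_mem _ hx', he⟩
          · rintro (h | ⟨hz, x', hx', he⟩)
            · exact Or.inl (Or.inl h)
            · rcases List.mem_cons.mp hx' with h' | h'
              · subst h'
                exact Or.inl (Or.inr he.2)
              · by_cases hzj : z = x.1 + PySem.Str.len x.2
                · exact Or.inl (Or.inr hzj)
                · exact Or.inr ⟨fun hc => (by rcases hc with hc | hc; exact hz hc; exact hzj hc), x', h', he⟩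
      · -- the target vertex was already seen
        have hmem : x.1 + PySem.Str.len x.2 ∈ s := by
          have htrue : PySem.Set.contains s (x.1 + PySem.Str.len x.2) = true := by
            revert hct
            cases PySem.Set.contains s (x.1 + PySem.Str.len x.2) <;> simp
          exact (PySem.Set.contains_iff s _).mp htrue
        have hstep : pvStep t (s, acc) x = (s, acc) := by
          rw [pvStep, if_neg (fun hc => hct hc.1)]
        rw [hstep]
        obtain ⟨c1, c2, c3⟩ := ih s acc hsub
        refine ⟨c1, ?_, ?_⟩
        · intro z
          rw [c2 z]
          constructor
          · rintro (h | ⟨x', hx', he⟩)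
            · exact Or.inl h
            · exact Or.inr ⟨x', List.mem_cons_of_mem _ hx', he⟩
          · rintro (h | ⟨x', hx', he⟩)
            · exact Or.inl h
            · rcases List.mem_cons.mp hx' with h' | h'
              · subst h'
                rw [he.2]
                exact Or.inl hmem
              · exact Or.inr ⟨x', h', he⟩
        · intro z
          rw [c3 z]
          constructor
          · rintro (h | ⟨hz, x', hx', he⟩)
            · exact Or.inl h
            · exact Or.inr ⟨hz, x', List.mem_cons_of_mem _ hx', he⟩
          · rintro (h | ⟨hz, x', hx', he⟩)
            · exact Or.inl h
            · rcases List.mem_cons.mp hx' with h' | h'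
              · subst h'
                rw [he.2] at hz
                exact absurd hmem hz
              · exact Or.inr ⟨hz, x', h', he⟩
    · -- the word does not match here: no edge
      have hstep : pvStep t (s, acc) x = (s, acc) := by
        rw [pvStep, if_neg (fun hc => hsl hc.2)]
      rw [hstep]
      obtain ⟨c1, c2, c3⟩ := ih s acc hsub
      refine ⟨c1, ?_, ?_⟩
      · intro z
        rw [c2 z]
        constructor
        · rintro (h | ⟨x', hx', he⟩)
          · exact Or.inl h
          · exact Or.inr ⟨x', List.mem_cons_of_mem _ hx', he⟩
        · rintro (h | ⟨x', hx', he⟩)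
          · exact Or.inl h
          · rcases List.mem_cons.mp hx' with h' | h'
            · subst h'; exact absurd he.1 hsl
            · exact Or.inr ⟨x', h', he⟩
      · intro z
        rw [c3 z]
        constructor
        · rintro (h | ⟨hz, x', hx', he⟩)
          · exact Or.inl h
          · exact Or.inr ⟨hz, x', List.mem_cons_of_mem _ hx', he⟩
        · rintro (h | ⟨hz, x', hx', he⟩)
          · exact Or.inl h
          · rcases List.mem_cons.mp hx' with h' | h'
            · subst h'; exact absurd he.1 hsl
            · exact Or.inr ⟨hz, x', h', he⟩

-- one-step unfolding of the BFS loop, with the nested fold flattened to pvStep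
theorem solutionAltLoop_eq (ws : List String) (t : String) (n : Int)
    (seen : PySem.Set Int) (frontier : List Int) (dist : Int) :
    solutionAltLoop ws t n seen frontier dist =
      if frontier ≠ [] ∧ dist < 20000 then
        if n ∈ frontier then dist
        else
          solutionAltLoop ws t n
            (((frontier.flatMap (fun i => ws.map (fun w => (i, w)))).foldl (pvStep t) (seen, [])).1)
            (((frontier.flatMap (fun i => ws.map (fun w => (i, w)))).foldl (pvStep t) (seen, [])).2)
            (dist + 1)
      else -1 := by
  rw [solutionAltLoop]
  by_cases h : frontier ≠ [] ∧ dist < 20000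
  · rw [dif_pos h, if_pos h]
    by_cases hn : n ∈ frontier
    · rw [if_pos hn, if_pos hn]
    · rw [if_neg hn, if_neg hn]
      have hfold : frontier.foldl (fun (p : PySem.Set Int × List Int) i =>
          ws.foldl (fun (p : PySem.Set Int × List Int) w =>
            let j := i + PySem.Str.len w
            if PySem.Set.contains p.1 j = false ∧ PySem.Str.slice t (some i) (some j) = w then
              (PySem.Set.add p.1 j, p.2 ++ [j])
            else p) p) (seen, ([] : List Int))
          = (frontier.flatMap (fun i => ws.map (fun w => (i, w)))).foldl (pvStep t) (seen, []) := by
        rw [← pvFoldl_nested_flatMap (pvStep t) frontier ws (seen, ([] : List Int))]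
        rfl
      simp only [hfold]
  · rw [dif_neg h, if_neg h]

-- the BFS invariant: frontier = layer `dist`, seen = all layers up to `dist`
theorem pvLoop (ws : List String) (t : String) (hws : ∀ w ∈ ws, w.toList ≠ []) :
    ∀ (fuel : Nat), ∀ (d : Nat), d ≤ 20000 → 20000 ≤ d + fuel →
      ∀ (seen frontier : List Int),
      (d < 20000 → ∀ z : Int,
        (z ∈ seen ↔ ∃ i : Nat, z = (i : Int) ∧ i ≤ t.toList.length ∧ pvNp ws (t.toList.take i) ≤ (d : Int))) →
      (d < 20000 → ∀ z : Int,
        (z ∈ frontier ↔ ∃ i : Nat, z = (i : Int) ∧ i ≤ t.toList.length ∧ pvNp ws (t.toList.take i) = (d : Int))) →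
      ((d : Int) ≤ pvNp ws t.toList) →
      solutionAltLoop ws t (t.toList.length : Int) seen frontier (d : Int)
        = (if pvNp ws t.toList < 20000 then pvNp ws t.toList else -1) := by
  intro fuel
  induction fuel with
  | zero =>
    intro d hd hfuel seen frontier _ _ hdle
    have hd20 : d = 20000 := by omega
    subst hd20
    have hg : ¬ (frontier ≠ [] ∧ ((20000 : Nat) : Int) < 20000) := by
      rintro ⟨-, h⟩; norm_num at h
    rw [solutionAltLoop_eq, if_neg hg]
    have hge : (20000 : Int) ≤ pvNp ws t.toList := by exact_mod_cast hdle
    have hn : ¬ pvNp ws t.toList < 20000 := by omega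
    rw [if_neg hn]
  | succ fuel ih =>
    intro d hd hfuel seen frontier hseen hfront hdle
    by_cases hdlt : d < 20000
    · have hseen' := hseen hdlt
      have hfront' := hfront hdlt
      by_cases hfe : frontier = []
      · have hg : ¬ (frontier ≠ [] ∧ ((d : Nat) : Int) < 20000) := by
          rintro ⟨h, -⟩; exact h hfe
        rw [solutionAltLoop_eq, if_neg hg]
        have hnot : ¬ pvNp ws t.toList < 20000 := by
          intro hlt
          obtain ⟨i, hiN, hdi⟩ := pvD_gap ws t.toList t.toList.length le_rfl
            (by rw [List.take_length]; exact hlt) (d : Int) (by positivity)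
            (by rw [List.take_length]; exact hdle)
          have : ((i : Int)) ∈ frontier := (hfront' (i : Int)).mpr ⟨i, rfl, hiN, hdi⟩
          rw [hfe] at this
          simp at this
        rw [if_neg hnot]
      · have hg : frontier ≠ [] ∧ ((d : Nat) : Int) < 20000 := ⟨hfe, by omega⟩
        rw [solutionAltLoop_eq, if_pos hg]
        by_cases hNf : ((t.toList.length : Nat) : Int) ∈ frontier
        · obtain ⟨i, hzi, _, hdi⟩ := (hfront' _).mp hNf
          have hiN : i = t.toList.length := by exact_mod_cast hzi.symm
          subst hiN
          rw [List.take_length] at hdi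
          rw [if_pos hNf]
          rw [if_pos (show pvNp ws t.toList < 20000 by omega)]
          omega
        · rw [if_neg hNf]
          have hne : pvNp ws t.toList ≠ (d : Int) := by
            intro hc
            exact hNf ((hfront' _).mpr ⟨t.toList.length, rfl, le_rfl, by rw [List.take_length]; exact hc⟩)
          have hdlt' : (d : Int) + 1 ≤ pvNp ws t.toList := by omega
          -- characterize the fold result
          set L := frontier.flatMap (fun i => ws.map (fun w => (i, w))) with hL
          obtain ⟨_, c2, c3⟩ := pvStep_fold t L seen [] (by simp)
          have hmemL : ∀ x : Int × String, x ∈ L ↔ ∃ i ∈ frontier, ∃ w ∈ ws, x = (i, w) := by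
            intro x
            rw [hL]
            simp only [List.mem_flatMap, List.mem_map]
            constructor
            · rintro ⟨i, hi, w, hw, rfl⟩
              exact ⟨i, hi, w, hw, rfl⟩
            · rintro ⟨i, hi, w, hw, rfl⟩
              exact ⟨i, hi, w, hw, rfl⟩
          -- forward: any edge target from the frontier is within one more layer
          have hE1 : ∀ z : Int, (∃ x ∈ L, pvE t x z) →
              ∃ j : Nat, z = (j : Int) ∧ j ≤ t.toList.length ∧ pvNp ws (t.toList.take j) ≤ (d : Int) + 1 := by
            rintro z ⟨x, hxL, hsl, hz⟩
            obtain ⟨iz, hif, w, hw, rfl⟩ := (hmemL x).mp hxL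
            obtain ⟨i, rfl, hiN, hdi⟩ := (hfront' iz).mp hif
            have hne' := hws w hw
            have hm := (pvSlice_iff t w i).mp hsl
            obtain ⟨hjN, hjle⟩ := pvD_edge ws t.toList i w hw hne' hm
            refine ⟨i + w.toList.length, ?_, hjN, by omega⟩
            rw [hz]
            simp only [PySem.Str.len_eq]
            push_cast
            ring
          -- backward: every position of layer d+1 is an edge target from the frontier
          have hE2 : ∀ j : Nat, j ≤ t.toList.length → pvNp ws (t.toList.take j) = (d : Int) + 1 →
              (d : Int) + 1 < 20000 → ∃ x ∈ L, pvE t x ((j : Int)) := by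
            intro j hjN hdj hdlt1
            have hj0 : j ≠ 0 := by
              intro hc; subst hc
              simp only [List.take_zero, pvNp_nil] at hdj
              omega
            obtain ⟨i, w, hw, hne', hij, hm, hdi⟩ := pvD_pred ws t.toList j hjN hj0 (by omega)
            have hif : ((i : Int)) ∈ frontier := (hfront' _).mpr ⟨i, rfl, by omega, by omega⟩
            refine ⟨((i : Int), w), (hmemL _).mpr ⟨_, hif, w, hw, rfl⟩, ?_, ?_⟩
            · exact (pvSlice_iff t w i).mpr hm
            · simp only [PySem.Str.len_eq]
              omega
          -- the recursive call
          have hcast : ((d : Nat) : Int) + 1 = (((d + 1 : Nat)) : Int) := by push_cast; ring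
          rw [hcast]
          apply ih (d + 1) (by omega) (by omega)
          · intro hlt1 z
            rw [c2 z]
            constructor
            · rintro (h | h)
              · obtain ⟨i, rfl, hiN, hdi⟩ := (hseen' z).mp h
                exact ⟨i, rfl, hiN, by push_cast; omega⟩
              · obtain ⟨j, rfl, hjN, hdj⟩ := hE1 z h
                exact ⟨j, rfl, hjN, by push_cast; omega⟩
            · rintro ⟨i, rfl, hiN, hdi⟩
              by_cases hle : pvNp ws (t.toList.take i) ≤ (d : Int)
              · exact Or.inl ((hseen' _).mpr ⟨i, rfl, hiN, hle⟩)
              · refine Or.inr (hE2 i hiN (by push_cast at hdi; omega) (by omega))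
          · intro hlt1 z
            rw [c3 z]
            simp only [List.mem_nil_iff, false_or]
            constructor
            · rintro ⟨hz, h⟩
              obtain ⟨j, rfl, hjN, hdj⟩ := hE1 z h
              have hgt : ¬ pvNp ws (t.toList.take j) ≤ (d : Int) := by
                intro hc
                exact hz ((hseen' _).mpr ⟨j, rfl, hjN, hc⟩)
              exact ⟨j, rfl, hjN, by push_cast; omega⟩
            · rintro ⟨i, rfl, hiN, hdi⟩
              push_cast at hdi
              constructor
              · intro hc
                obtain ⟨i', hii', _, hdi'⟩ := (hseen' _).mp hc
                have : i' = i := by exact_mod_cast hii'.symm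
                subst this
                omega
              · exact hE2 i hiN (by omega) (by omega)
          · push_cast
            omega
    · have hd20 : d = 20000 := by omega
      subst hd20
      have hg : ¬ (frontier ≠ [] ∧ ((20000 : Nat) : Int) < 20000) := by
        rintro ⟨-, h⟩; norm_num at h
      rw [solutionAltLoop_eq, if_neg hg]
      have hge : (20000 : Int) ≤ pvNp ws t.toList := by exact_mod_cast hdle
      have hn : ¬ pvNp ws t.toList < 20000 := by omega
      rw [if_neg hn]

theorem solutionB_eq (strs : List String) (t : String) :
    solution_alt strs t =
      (if pvNp strs t.toList < 20000 then pvNp strs t.toList else -1) := by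
  have hws : ∀ w ∈ strs.filter (fun w => w ≠ ""), w.toList ≠ [] := by
    intro w hw
    have := (List.mem_filter.mp hw).2
    simp only [decide_eq_true_eq] at this
    exact (pvNe_empty_iff w).mp this
  have hfilter := pvNp_filter_aux strs t.toList.length t.toList le_rfl
  have h0 : ∀ i : Nat, i ≤ t.toList.length → pvNp (strs.filter (fun w => w ≠ "")) (t.toList.take i) = 0 → i = 0 := by
    intro i hiN hdi
    by_contra hi0
    have hlen : (t.toList.take i).length ≠ 0 := by
      rw [List.length_take]; omega
    have := pvNp_pos (strs.filter (fun w => w ≠ "")) (t.toList.take i) hlen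
    omega
  have hmain := pvLoop (strs.filter (fun w => w ≠ "")) t hws 20000 0 (by omega) (by omega)
    (PySem.Set.ofList [0]) [0]
    (by
      intro _ z
      show z ∈ [(0 : Int)] ↔ _
      simp only [List.mem_singleton]
      constructor
      · rintro rfl
        exact ⟨0, by norm_num, by omega, by simp [pvNp_nil]⟩
      · rintro ⟨i, rfl, hiN, hdi⟩
        have hnn := pvNp_nonneg (strs.filter (fun w => w ≠ "")) (t.toList.take i)
        have : i = 0 := h0 i hiN (by push_cast at hdi; omega)
        subst this
        norm_num)
    (by
      intro _ z
      simp only [List.mem_singleton]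
      constructor
      · rintro rfl
        exact ⟨0, by norm_num, by omega, by simp [pvNp_nil]⟩
      · rintro ⟨i, rfl, hiN, hdi⟩
        have : i = 0 := h0 i hiN (by push_cast at hdi; omega)
        subst this
        norm_num)
    (by
      push_cast
      exact pvNp_nonneg _ _)
  simp only [Nat.cast_zero] at hmain
  show solutionAltLoop (strs.filter (fun w => w ≠ "")) t (PySem.Str.len t) (PySem.Set.ofList [0]) [0] 0 = _
  rw [PySem.Str.len_eq, hmain, hfilter]

-- ===== VERDICT =====
theorem solution_spec : Claim_equal_solution := by
  intro strs t _ _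
  unfold Spec_solution
  rw [solutionA_eq, solutionB_eq]
  by_cases hlt : pvNp strs t.toList < 20000
  · rw [if_neg (by omega), if_pos hlt]
  · rw [if_pos (by omega), if_neg hlt]
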